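-- pv_equiv track=rewrite | github.com/meteorcyclops/doggo-dashboard | scripts/build_dashboard_data.py | weather_summary
-- ===== SOURCE A (Python) =====
-- from typing import Any
--
-- def weather_summary(items: list[dict[str, Any]]) -> str:
--     if not items:
--         return "今天先看天空臉色，天氣資料還沒整理好。"
--     max_rain = max((item.get('rainChance') or 0) for item in items)
--     if max_rain >= 60:
--         return "出門建議帶傘。"
--     if max_rain >= 30:
--         return "可能遇到零星雨。"
--     return "今天大致穩。"
-- ===== SOURCE B (Python) =====
-- def weather_summary(items: list[dict[str, "Any"]]) -> str:
--     if not items: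
--         return "今天先看天空臉色，天氣資料還沒整理好。"
--     if any((item.get('rainChance') or 0) >= 60 for item in items):
--         return "出門建議帶傘。"
--     if any((item.get('rainChance') or 0) >= 30 for item in items):
--         return "可能遇到零星雨。"
--     return "今天大致穩。"
-- ===== Notes on version B (the rewrite author's own statement) =====
-- stated objective: alternative
-- what changed: Replaces the single max-reduction over all rain chances by two threshold-ordered any() scans that short-circuit on the first qualifying item.
import Mathlib
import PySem

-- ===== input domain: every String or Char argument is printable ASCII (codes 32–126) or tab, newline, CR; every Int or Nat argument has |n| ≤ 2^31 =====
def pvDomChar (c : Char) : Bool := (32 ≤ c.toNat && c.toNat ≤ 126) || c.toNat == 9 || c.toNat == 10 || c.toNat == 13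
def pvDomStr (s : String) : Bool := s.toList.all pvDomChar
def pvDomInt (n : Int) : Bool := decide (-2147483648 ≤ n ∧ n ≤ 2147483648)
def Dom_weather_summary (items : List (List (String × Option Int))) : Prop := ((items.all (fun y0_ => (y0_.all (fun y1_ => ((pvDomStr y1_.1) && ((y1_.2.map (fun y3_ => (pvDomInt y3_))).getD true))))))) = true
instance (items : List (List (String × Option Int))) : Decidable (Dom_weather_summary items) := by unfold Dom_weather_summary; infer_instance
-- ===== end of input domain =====

-- B replaces A's max-reduction by two short-circuiting threshold scans (any ≥60, then any ≥30);
-- same values everywhere (objective: alternative decomposition).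

-- `item.get('rainChance') or 0`: missing key or None → 0; an int 0 is falsy and `0 or 0 = 0`,
-- so numerically this is getD none followed by getD 0 (exact).
def pvRain (item : List (String × Option Int)) : Int :=
  (((PySem.Dict.mk item).get? "rainChance").getD none).getD 0

-- ===== PORT A =====
def weather_summary (items : List (List (String × Option Int))) : String :=
  match items with
  | [] => "今天先看天空臉色，天氣資料還沒整理好。"
  | h :: t =>
    -- Python max over the generator: first element as accumulator, fold max over the rest
    let max_rain : Int := (t.map pvRain).foldl max (pvRain h)
    if 60 ≤ max_rain then "出門建議帶傘。"
    else if 30 ≤ max_rain then "可能遇到零星雨。"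
    else "今天大致穩。"

-- ===== PORT B =====
def weather_summary_alt (items : List (List (String × Option Int))) : String :=
  if items = [] then "今天先看天空臉色，天氣資料還沒整理好。"
  else if items.any (fun item => 60 ≤ pvRain item) then "出門建議帶傘。"
  else if items.any (fun item => 30 ≤ pvRain item) then "可能遇到零星雨。"
  else "今天大致穩。"

-- ===== PRECONDITION & SPEC =====
def Spec_weather_summary (items : List (List (String × Option Int))) (out : String) : Prop := out = weather_summary_alt items
instance (items : List (List (String × Option Int))) (out : String) : Decidable (Spec_weather_summary items out) := by unfold Spec_weather_summary; infer_instance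

-- ===== CLAIM (what is proved, stated in full; the proofs are below) =====
def Claim_equal_weather_summary : Prop := ∀ (items : List (List (String × Option Int))), Dom_weather_summary items → Spec_weather_summary items (weather_summary items)

-- ===== LEMMAS AND PROOFS =====

theorem pv_foldl_max_ge (c : Int) (vs : List Int) : ∀ v : Int,
    (c ≤ vs.foldl max v ↔ c ≤ v ∨ ∃ x ∈ vs, c ≤ x) := by
  induction vs with
  | nil => intro v; simp
  | cons y ys ih =>
      intro v
      rw [List.foldl_cons, ih, le_max_iff]
      simp only [List.mem_cons]
      constructor
      · rintro ((h1 | h1) | ⟨x, hx, hc⟩)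
        · exact Or.inl h1
        · exact Or.inr ⟨y, Or.inl rfl, h1⟩
        · exact Or.inr ⟨x, Or.inr hx, hc⟩
      · rintro (h1 | ⟨x, hx | hx, hc⟩)
        · exact Or.inl (Or.inl h1)
        · exact Or.inl (Or.inr (hx ▸ hc))
        · exact Or.inr ⟨x, hx, hc⟩

theorem pv_max_iff_any (c : Int) (h : List (String × Option Int))
    (t : List (List (String × Option Int))) :
    (c ≤ (t.map pvRain).foldl max (pvRain h)) ↔
      (h :: t).any (fun item => decide (c ≤ pvRain item)) = true := by
  rw [pv_foldl_max_ge]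
  simp

-- ===== VERDICT (by name: the statement is the Claim_ definition above) =====
theorem weather_summary_spec : Claim_equal_weather_summary := by
  intro items _
  unfold Spec_weather_summary weather_summary weather_summary_alt
  cases items with
  | nil => simp
  | cons h t =>
      simp only [reduceCtorEq, if_false]
      simp only [pv_max_iff_any]
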